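-- pv_equiv track=rewrite | github.com/yingl/LintCodeInPython | rotated-digits.py | check
-- ===== SOURCE A (Python) =====
-- def check(n):
--     ret = 0
--     while n > 0:
--         i = n % 10
--         n = int(n / 10)
--         if i in [3, 4, 7]:
--             return 0
--         elif i in [2, 5, 6, 9]:
--             ret = 1
--     return ret
-- ===== SOURCE B (Python) =====
-- def check(n):
--     if n <= 0:
--         return 0
--     d = set(str(n))
--     if d & {'3', '4', '7'}:
--         return 0
--     return 1 if d & {'2', '5', '6', '9'} else 0
-- ===== Notes on version B (the rewrite author's own statement) =====
-- stated objective: idiomatic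
-- what changed: B builds the set of decimal digit characters once via set(str(n)) and answers with two set-intersection tests, instead of A's per-digit %/int-division peeling loop with early exit and an accumulator flag.
import Mathlib
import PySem

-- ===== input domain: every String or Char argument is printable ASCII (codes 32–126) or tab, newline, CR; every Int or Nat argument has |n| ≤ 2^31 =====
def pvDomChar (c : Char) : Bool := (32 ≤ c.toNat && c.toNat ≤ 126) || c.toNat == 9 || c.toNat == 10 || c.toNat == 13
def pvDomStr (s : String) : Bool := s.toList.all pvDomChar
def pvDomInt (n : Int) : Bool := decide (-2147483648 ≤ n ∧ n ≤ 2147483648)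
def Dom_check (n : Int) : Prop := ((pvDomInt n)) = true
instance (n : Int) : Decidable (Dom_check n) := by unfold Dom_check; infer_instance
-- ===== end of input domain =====

-- B replaces A's %/int-division digit-peeling loop by building the set of decimal digit
-- characters of str(n) once and answering with two set-intersection tests (idiomatic).


-- ===== PORT A =====
-- the while loop of A; `int(n / 10)` is PySem.Int.truncdiv (exact for |n| < 2^53)
def checkLoop (n ret : Int) : Int :=
  if _h : n > 0 then
    let i := PySem.Int.mod n 10
    let n' := PySem.Int.truncdiv n 10
    if i = 3 ∨ i = 4 ∨ i = 7 then 0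
    else if i = 2 ∨ i = 5 ∨ i = 6 ∨ i = 9 then checkLoop n' 1
    else checkLoop n' ret
  else ret
termination_by n.toNat
decreasing_by
  all_goals
    rw [PySem.Int.truncdiv, Int.tdiv_eq_ediv_of_nonneg (by omega)]; omega

def check (n : Int) : Int := checkLoop n 0

-- ===== PORT B =====
def check_alt (n : Int) : Int :=
  if n ≤ 0 then 0
  else
    let d : PySem.Set Char := PySem.Set.ofList (PySem.Int.toStr n).toList
    if d.any (fun c => ['3', '4', '7'].contains c) then 0
    else if d.any (fun c => ['2', '5', '6', '9'].contains c) then 1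
    else 0

-- ===== PRECONDITION & SPEC =====
def Spec_check (n : Int) (out : Int) : Prop := out = check_alt n
instance (n : Int) (out : Int) : Decidable (Spec_check n out) := by unfold Spec_check; infer_instance

-- ===== CLAIM (what is proved, stated in full; the proofs are below) =====
def Claim_equal_check : Prop := ∀ (n : Int), Dom_check n → Spec_check n (check n)

-- ===== LEMMAS AND PROOFS =====

-- least-significant-first decimal digits of a natural number
def natDigits (m : Nat) : List Nat :=
  if _h : m = 0 then [] else m % 10 :: natDigits (m / 10)
termination_by m
decreasing_by exact Nat.div_lt_self (Nat.pos_of_ne_zero _h) (by omega)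

def badD (d : Nat) : Bool := d == 3 || d == 4 || d == 7
def goodD (d : Nat) : Bool := d == 2 || d == 5 || d == 6 || d == 9

lemma mod_cast10 (m : Nat) : PySem.Int.mod (↑m) 10 = ↑(m % 10) := by
  simp [PySem.Int.mod, Int.fmod_eq_emod]

lemma truncdiv_cast10 (m : Nat) : PySem.Int.truncdiv (↑m) 10 = ↑(m / 10) := by
  rw [PySem.Int.truncdiv, Int.tdiv_eq_ediv_of_nonneg (by omega)]; omega

lemma checkLoop_eq (m : Nat) : ∀ ret,
    checkLoop (↑m) ret =
      if (natDigits m).any badD then 0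
      else if (natDigits m).any goodD then 1 else ret := by
  induction m using Nat.strong_induction_on with
  | _ m ih =>
    intro ret
    rw [checkLoop]
    by_cases hm : m = 0
    · subst hm; simp [natDigits]
    · have hpos : (0:Int) < ↑m := by omega
      have hdiv : m / 10 < m := Nat.div_lt_self (Nat.pos_of_ne_zero hm) (by omega)
      rw [dif_pos hpos]
      simp only [mod_cast10, truncdiv_cast10]
      rw [natDigits, dif_neg hm]
      simp only [List.any_cons]
      by_cases hb : badD (m % 10)
      · have : ((↑(m % 10) : Int) = 3 ∨ (↑(m % 10) : Int) = 4 ∨ (↑(m % 10) : Int) = 7) := by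
          simp [badD] at hb; omega
        rw [if_pos this]; simp [hb]
      · have hb' : ¬ ((↑(m % 10) : Int) = 3 ∨ (↑(m % 10) : Int) = 4 ∨ (↑(m % 10) : Int) = 7) := by
          simp [badD] at hb ⊢; omega
        rw [if_neg hb']
        by_cases hg : goodD (m % 10)
        · have : ((↑(m % 10) : Int) = 2 ∨ (↑(m % 10) : Int) = 5 ∨ (↑(m % 10) : Int) = 6 ∨ (↑(m % 10) : Int) = 9) := by
            simp [goodD] at hg; omega
          rw [if_pos this, ih _ hdiv]
          simp [hb, hg]
        · have hg' : ¬ ((↑(m % 10) : Int) = 2 ∨ (↑(m % 10) : Int) = 5 ∨ (↑(m % 10) : Int) = 6 ∨ (↑(m % 10) : Int) = 9) := by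
            simp [goodD] at hg ⊢; omega
          rw [if_neg hg', ih _ hdiv]
          simp [hb, hg]

lemma natDigits_lt (m : Nat) : ∀ d ∈ natDigits m, d < 10 := by
  induction m using Nat.strong_induction_on with
  | _ m ih =>
    intro d hd
    rw [natDigits] at hd
    by_cases hm : m = 0
    · simp [hm] at hd
    · rw [dif_neg hm, List.mem_cons] at hd
      rcases hd with h | h
      · omega
      · exact ih _ (Nat.div_lt_self (Nat.pos_of_ne_zero hm) (by omega)) d h

lemma toDigitsCore_eq (f : Nat) : ∀ m l, 0 < m → m < f →
    Nat.toDigitsCore 10 f m l = ((natDigits m).map Nat.digitChar).reverse ++ l := by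
  induction f with
  | zero => intro m l h1 h2; omega
  | succ f ih =>
    intro m l h1 h2
    rw [Nat.toDigitsCore]
    by_cases hd : m / 10 = 0
    · simp only [hd]
      rw [natDigits, dif_neg (by omega), natDigits, dif_pos hd]
      simp
    · rw [if_neg hd]
      rw [ih (m / 10) _ (Nat.pos_of_ne_zero hd)
        (by have := Nat.div_lt_self h1 (show 1 < 10 by omega); omega)]
      conv_rhs => rw [natDigits, dif_neg (show ¬ m = 0 by omega)]
      simp

lemma toDigits_eq (m : Nat) (h : 0 < m) :
    Nat.toDigits 10 m = ((natDigits m).map Nat.digitChar).reverse := by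
  have := toDigitsCore_eq (m + 1) m [] h (by omega)
  simpa [Nat.toDigits] using this

lemma any_ofList (l : List Char) (p : Char → Bool) :
    (PySem.Set.ofList l).any p = l.any p := by
  rw [Bool.eq_iff_iff]
  simp only [List.any_eq_true]
  constructor
  · rintro ⟨x, hx, hp⟩; exact ⟨x, (PySem.Set.mem_ofList l x).1 hx, hp⟩
  · rintro ⟨x, hx, hp⟩; exact ⟨x, (PySem.Set.mem_ofList l x).2 hx, hp⟩

lemma bad_char (d : Nat) (h : d < 10) :
    (['3', '4', '7'].contains (Nat.digitChar d)) = badD d := by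
  interval_cases d <;> decide

lemma good_char (d : Nat) (h : d < 10) :
    (['2', '5', '6', '9'].contains (Nat.digitChar d)) = goodD d := by
  interval_cases d <;> decide

lemma any_digitChar (m : Nat) (p : Char → Bool) (q : Nat → Bool)
    (h : ∀ d, d < 10 → p (Nat.digitChar d) = q d) :
    (((natDigits m).map Nat.digitChar).reverse).any p = (natDigits m).any q := by
  rw [List.any_reverse, List.any_map]
  rw [Bool.eq_iff_iff]
  simp only [List.any_eq_true, Function.comp]
  constructor
  · rintro ⟨d, hd, hp⟩; exact ⟨d, hd, by rw [← h d (natDigits_lt m d hd)]; exact hp⟩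
  · rintro ⟨d, hd, hp⟩; exact ⟨d, hd, by rw [h d (natDigits_lt m d hd)]; exact hp⟩

-- ===== VERDICT (by name: the statement is the Claim_ definition above) =====
theorem check_spec : Claim_equal_check := by
  intro n _
  unfold Spec_check check check_alt
  by_cases hn : n ≤ 0
  · rw [checkLoop, dif_neg (by omega), if_pos hn]
  · rw [if_neg hn]
    have hm : (0:Int) < n := by omega
    obtain ⟨m, rfl⟩ : ∃ m : Nat, n = ↑m := ⟨n.toNat, by omega⟩
    have hm' : 0 < m := by omega
    have hchars : (PySem.Int.toStr (↑m)).toList = ((natDigits m).map Nat.digitChar).reverse := by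
      rw [PySem.Int.toList_toStr, PySem.Int.toChars, if_neg (by omega)]
      rw [Int.toNat_natCast, toDigits_eq m hm']
    rw [checkLoop_eq m 0]
    simp only [hchars, any_ofList]
    rw [any_digitChar m _ badD bad_char, any_digitChar m _ goodD good_char]
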